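-- pv_equiv track=rewrite | github.com/Ga420Low/project-os-core | src/project_os_core/debug_resilience.py | _merge_statuses
-- ===== SOURCE A (Python) =====
-- def _merge_statuses(values: tuple[str | None, ...]) -> str:
--     order = {"ok": 0, "attention": 1, "breach": 2}
--     result = "ok"
--     for value in values:
--         normalized = str(value or "ok").strip().lower()
--         if order.get(normalized, 0) > order.get(result, 0):
--             result = normalized
--     return result
-- ===== SOURCE B (Python) =====
-- def _merge_statuses(values):
--     seen = {str(v or "ok").strip().lower() for v in values}
--     if "breach" in seen:
--         return "breach"
--     if "attention" in seen:
--         return "attention"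
--     return "ok"
-- ===== Notes on version B (the rewrite author's own statement) =====
-- stated objective: simpler
-- what changed: Replaces the running-max loop over a severity dict with a one-shot set of normalized values followed by two ordered membership tests (breach first, then attention).
import Mathlib
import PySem

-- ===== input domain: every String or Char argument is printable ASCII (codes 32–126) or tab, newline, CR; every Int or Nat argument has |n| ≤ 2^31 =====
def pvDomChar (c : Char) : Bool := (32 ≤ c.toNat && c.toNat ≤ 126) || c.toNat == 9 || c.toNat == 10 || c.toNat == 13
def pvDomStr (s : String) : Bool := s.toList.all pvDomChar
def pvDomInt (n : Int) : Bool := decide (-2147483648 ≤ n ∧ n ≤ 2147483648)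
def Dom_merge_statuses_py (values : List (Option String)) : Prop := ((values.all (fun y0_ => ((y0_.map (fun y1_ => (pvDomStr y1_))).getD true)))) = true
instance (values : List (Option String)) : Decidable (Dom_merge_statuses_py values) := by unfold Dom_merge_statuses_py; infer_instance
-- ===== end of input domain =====

-- B replaces A's running-max loop over a severity dict by a set of normalized values plus two ordered membership tests; objective: simpler.

-- ===== PORT A =====
-- str(value or "ok").strip().lower()  (value or "ok": None and "" are falsy); the same
-- normalization expression appears verbatim in both Pythons, so both ports share this helper.
def pyNormalize (value : Option String) : String :=
  PySem.Str.lower (PySem.Str.strip (match value with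
    | none => "ok"
    | some s => if s = "" then "ok" else s))

def merge_statuses_py (values : List (Option String)) : String :=
  let order : PySem.Dict String Int := PySem.Dict.ofList [("ok", 0), ("attention", 1), ("breach", 2)]
  values.foldl (fun result value =>
    let normalized := pyNormalize value
    if order.getD normalized 0 > order.getD result 0 then normalized else result) "ok"

-- ===== PORT B =====
def merge_statuses_py_alt (values : List (Option String)) : String :=
  let seen : PySem.Set String := PySem.Set.ofList (values.map pyNormalize)
  if PySem.Set.contains seen "breach" then "breach"
  else if PySem.Set.contains seen "attention" then "attention"
  else "ok"

-- ===== PRECONDITION & SPEC =====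
def Spec_merge_statuses_py (values : List (Option String)) (out : String) : Prop := out = merge_statuses_py_alt values
instance (values : List (Option String)) (out : String) : Decidable (Spec_merge_statuses_py values out) := by unfold Spec_merge_statuses_py; infer_instance

-- ===== CLAIM (what is proved, stated in full; the proofs are below) =====
def Claim_equal_merge_statuses_py : Prop := ∀ (values : List (Option String)), Dom_merge_statuses_py values → Spec_merge_statuses_py values (merge_statuses_py values)

-- ===== LEMMAS AND PROOFS =====

def sev (s : String) : Int := if s = "breach" then 2 else if s = "attention" then 1 else 0

-- severity of a string under A's dict lookup
theorem getD_order (s : String) :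
    (PySem.Dict.ofList [("ok", (0:Int)), ("attention", 1), ("breach", 2)]).getD s 0 = sev s := by
  simp only [PySem.Dict.ofList, PySem.Dict.update, List.foldl, PySem.Dict.getD_insert,
    PySem.Dict.getD_empty, sev]
  split_ifs <;> simp_all

-- A's loop body is the pure severity step
theorem stepA_eq :
    (fun (result : String) (value : Option String) =>
      let normalized := pyNormalize value
      if (PySem.Dict.ofList [("ok", (0:Int)), ("attention", 1), ("breach", 2)]).getD normalized 0
         > (PySem.Dict.ofList [("ok", (0:Int)), ("attention", 1), ("breach", 2)]).getD result 0
       then normalized else result)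
    = fun result value => if sev result < sev (pyNormalize value) then pyNormalize value else result := by
  funext r v
  simp only [getD_order, gt_iff_lt]

-- characterization of A's severity fold for an arbitrary accumulator
theorem fold_char (values : List (Option String)) (r : String) :
    values.foldl (fun result value =>
        if sev result < sev (pyNormalize value) then pyNormalize value else result) r
    = if (∃ v ∈ values, pyNormalize v = "breach") ∨ r = "breach" then "breach"
      else if (∃ v ∈ values, pyNormalize v = "attention") ∨ r = "attention" then "attention"
      else r := by
  induction values generalizing r with
  | nil => simp only [List.foldl_nil, List.not_mem_nil, false_and, exists_false, false_or]
           split_ifs <;> simp_all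
  | cons v vs ih =>
      simp only [List.foldl_cons, List.mem_cons]
      rw [ih]
      by_cases hb : pyNormalize v = "breach" <;> by_cases ha : pyNormalize v = "attention" <;>
      by_cases rb : r = "breach" <;> by_cases ra : r = "attention" <;>
        simp_all [sev] <;> split_ifs <;> simp_all <;> omega

theorem set_contains_iff (xs : List String) (x : String) :
    PySem.Set.contains (PySem.Set.ofList xs) x = true ↔ x ∈ xs := by
  rw [PySem.Set.contains_iff, PySem.Set.mem_ofList]

-- ===== VERDICT (by name: the statement is the Claim_ definition above) =====
theorem merge_statuses_py_spec : Claim_equal_merge_statuses_py := by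
  intro values _
  unfold Spec_merge_statuses_py
  simp only [merge_statuses_py, merge_statuses_py_alt, stepA_eq, fold_char]
  by_cases hb : ∃ v ∈ values, pyNormalize v = "breach" <;>
  by_cases ha : ∃ v ∈ values, pyNormalize v = "attention" <;>
    simp_all [set_contains_iff, List.mem_map]
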